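-- pv_equiv track=rewrite | github.com/paulross24/pumpkin-v3 | pumpkin/propose.py | _match_ha_person
-- ===== SOURCE A (Python) =====
-- from typing import Any, Dict, List, Optional, Tuple
--
-- def _match_ha_person(name: str, people: List[Dict[str, Any]]) -> Optional[Dict[str, Any]]:
--     if not name:
--         return None
--     needle = name.strip().lower()
--     for person in people:
--         pname = str(person.get("name") or "").strip().lower()
--         entity_id = str(person.get("entity_id") or "")
--         entity_tail = entity_id.split(".", 1)[-1].lower() if "." in entity_id else entity_id.lower()
--         if needle == pname or needle == entity_id.lower() or needle == entity_tail:
--             return person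
--     return None
-- ===== SOURCE B (Python) =====
-- def _match_ha_person(name, people):
--     if not name:
--         return None
--     index = {}
--     for person in people:
--         pname = str(person.get("name") or "").strip().lower()
--         entity_id = str(person.get("entity_id") or "")
--         entity_tail = entity_id.split(".", 1)[-1].lower() if "." in entity_id else entity_id.lower()
--         for key in (pname, entity_id.lower(), entity_tail):
--             if key not in index:
--                 index[key] = person
--     return index.get(name.strip().lower())
-- ===== Notes on version B (the rewrite author's own statement) =====
-- stated objective: alternative
-- what changed: B builds a first-occurrence-wins dict from each person's three variant keys in one pass and resolves the match by a single keyed lookup, instead of A's per-person scan comparing the needle against each variant.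
import Mathlib
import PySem

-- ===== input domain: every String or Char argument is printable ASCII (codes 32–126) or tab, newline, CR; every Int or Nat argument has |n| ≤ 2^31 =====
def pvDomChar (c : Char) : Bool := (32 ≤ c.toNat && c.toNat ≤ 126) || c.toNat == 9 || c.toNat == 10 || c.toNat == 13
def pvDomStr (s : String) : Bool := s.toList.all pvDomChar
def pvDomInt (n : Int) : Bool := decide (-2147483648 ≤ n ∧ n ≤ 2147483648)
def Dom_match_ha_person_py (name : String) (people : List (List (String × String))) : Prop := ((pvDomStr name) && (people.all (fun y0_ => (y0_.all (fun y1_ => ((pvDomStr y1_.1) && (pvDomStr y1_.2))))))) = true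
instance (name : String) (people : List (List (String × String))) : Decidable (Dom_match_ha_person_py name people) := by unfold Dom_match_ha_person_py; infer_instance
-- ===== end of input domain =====

-- B replaces A's person-by-person comparison of the needle against three variant strings by a
-- dict built in one pass (each variant key inserted only if absent, so first occurrence wins)
-- and a single keyed lookup; objective: alternative (same asymptotic cost, different structure).

-- Shared helper: the three variant strings both Pythons compute identically for a person.
-- str(person.get("name") or "").strip().lower()
def pvPname (person : List (String × String)) : String :=
  PySem.Str.lower (PySem.Str.strip (((PySem.Dict.mk person).get? "name").getD ""))

-- str(person.get("entity_id") or "")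
def pvEntityId (person : List (String × String)) : String :=
  ((PySem.Dict.mk person).get? "entity_id").getD ""

-- entity_id.split(".", 1)[-1].lower() if "." in entity_id else entity_id.lower()
-- ([-1] is PySem.List.pyGet? … (-1); split(sep,1) is nonempty so the .getD "" default is never used
def pvEntityTail (eid : String) : String :=
  if PySem.Str.isIn "." eid then
    PySem.Str.lower ((PySem.List.pyGet? ((PySem.Str.splitMax? eid "." 1).getD []) (-1)).getD "")
  else PySem.Str.lower eid

-- ===== PORT A =====
def pvMatchLoop (needle : String) (people : List (List (String × String))) :
    Option (List (String × String)) :=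
  match people with
  | [] => none
  | person :: rest =>
    let pname := pvPname person
    let entityId := pvEntityId person
    let entityTail := pvEntityTail entityId
    if needle == pname || needle == PySem.Str.lower entityId || needle == entityTail then
      some person
    else pvMatchLoop needle rest

def match_ha_person_py (name : String) (people : List (List (String × String))) :
    Option (List (String × String)) :=
  if name == "" then none
  else pvMatchLoop (PySem.Str.lower (PySem.Str.strip name)) people

-- ===== PORT B =====
-- 'if key not in index: index[key] = person'
def pvAddIfAbsent (d : PySem.Dict String (List (String × String)))
    (k : String) (person : List (String × String)) :
    PySem.Dict String (List (String × String)) :=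
  if d.contains k then d else d.insert k person

-- one iteration of B's loop over people (the three variant keys in tuple order)
def pvIndexStep (d : PySem.Dict String (List (String × String)))
    (person : List (String × String)) : PySem.Dict String (List (String × String)) :=
  let pname := pvPname person
  let entityId := pvEntityId person
  let entityTail := pvEntityTail entityId
  pvAddIfAbsent (pvAddIfAbsent (pvAddIfAbsent d pname person)
    (PySem.Str.lower entityId) person) entityTail person

def pvBuildIndex (people : List (List (String × String))) :
    PySem.Dict String (List (String × String)) :=
  people.foldl pvIndexStep PySem.Dict.empty

def match_ha_person_py_alt (name : String) (people : List (List (String × String))) :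
    Option (List (String × String)) :=
  if name == "" then none
  else (pvBuildIndex people).get? (PySem.Str.lower (PySem.Str.strip name))

-- ===== PRECONDITION & SPEC =====
def Spec_match_ha_person_py (name : String) (people : List (List (String × String))) (out : Option (List (String × String))) : Prop := out = match_ha_person_py_alt name people
instance (name : String) (people : List (List (String × String))) (out : Option (List (String × String))) : Decidable (Spec_match_ha_person_py name people out) := by unfold Spec_match_ha_person_py; infer_instance

-- ===== CLAIM (what is proved, stated in full; the proofs are below) =====
def Claim_equal_match_ha_person_py : Prop := ∀ (name : String) (people : List (List (String × String))), Dom_match_ha_person_py name people → Spec_match_ha_person_py name people (match_ha_person_py name people)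

-- ===== LEMMAS AND PROOFS =====

theorem pvAddIfAbsent_get? (d : PySem.Dict String (List (String × String)))
    (k x : String) (p : List (String × String)) :
    (pvAddIfAbsent d k p).get? x =
      (d.get? x).or (if x = k then some p else none) := by
  unfold pvAddIfAbsent
  by_cases hc : d.contains k = true
  · simp only [hc, if_true]
    by_cases hx : x = k
    · subst hx
      rw [PySem.Dict.contains_eq_isSome_get?] at hc
      cases h : d.get? x with
      | none => simp [h] at hc
      | some v => simp
    · simp [hx]
  · simp only [Bool.not_eq_true] at hc
    simp only [hc, Bool.false_eq_true, if_false]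
    rw [PySem.Dict.get?_insert]
    by_cases hx : x = k
    · subst hx
      have hn : d.get? x = none := by
        rw [PySem.Dict.contains_eq_isSome_get?] at hc
        cases h : d.get? x <;> simp [h] at hc ⊢
      simp [hn]
    · simp [hx]

theorem pvIndexStep_get? (d : PySem.Dict String (List (String × String)))
    (person : List (String × String)) (x : String) :
    (pvIndexStep d person).get? x =
      (d.get? x).or
        (if x == pvPname person || x == PySem.Str.lower (pvEntityId person)
            || x == pvEntityTail (pvEntityId person) then some person else none) := by
  simp only [pvIndexStep, pvAddIfAbsent_get?, Option.or_assoc]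
  cases hd : d.get? x with
  | some v => simp [Option.or]
  | none =>
  simp only [Option.none_or]
  by_cases h1 : x = pvPname person
  · subst h1; simp
  · by_cases h2 : x = PySem.Str.lower (pvEntityId person)
    · subst h2; simp [h1]
    · by_cases h3 : x = pvEntityTail (pvEntityId person)
      · subst h3; simp [h1, h2]
      · simp [h1, h2, h3]

theorem pvFold_get? (needle : String) (people : List (List (String × String)))
    (d : PySem.Dict String (List (String × String))) :
    (people.foldl pvIndexStep d).get? needle =
      (d.get? needle).or (pvMatchLoop needle people) := by
  induction people generalizing d with
  | nil => simp [pvMatchLoop]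
  | cons person rest ih =>
    rw [List.foldl_cons, ih, pvIndexStep_get?, Option.or_assoc]
    cases hd : d.get? needle with
    | some v => simp [Option.or]
    | none =>
    simp only [Option.none_or]
    rw [pvMatchLoop]
    by_cases hb : (needle == pvPname person || needle == PySem.Str.lower (pvEntityId person)
        || needle == pvEntityTail (pvEntityId person)) = true
    · simp [hb]
    · simp only [Bool.not_eq_true] at hb
      simp [hb]

-- ===== VERDICT (by name: the statement is the Claim_ definition above) =====
theorem match_ha_person_py_spec : Claim_equal_match_ha_person_py := by
  intro name people _
  unfold Spec_match_ha_person_py match_ha_person_py match_ha_person_py_alt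
  by_cases h : name == ""
  · simp [h]
  · simp only [h, Bool.false_eq_true, if_false] at *
    rw [pvBuildIndex, pvFold_get?]
    simp [PySem.Dict.get?_empty]
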